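-- pv_equiv track=rewrite | github.com/webbrowser11/scheil | src/compiler.py | escape_string_for_llvm
-- ===== SOURCE A (Python) =====
-- def escape_string_for_llvm(text):
--     """Escape string for LLVM IR format"""
--     escaped = ""
--     for char in text:
--         if char == '\\':
--             escaped += "\\5C"
--         elif char == '"':
--             escaped += "\\22"
--         elif char == '\n':
--             escaped += "\\0A"
--         elif char == '\r':
--             escaped += "\\0D"
--         elif char == '\t':
--             escaped += "\\09"
--         elif ord(char) < 32 or ord(char) > 126:
--             escaped += f"\\{ord(char):02X}"
--         else:
--             escaped += char
--     return escaped
-- ===== SOURCE B (Python) =====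
-- def escape_string_for_llvm(text):
--     """Escape string for LLVM IR format"""
--     table = {n: "\\%02X" % n for n in range(256)
--              if n < 32 or n > 126 or n in (34, 92)}
--     return text.translate(table)
-- ===== Notes on version B (the rewrite author's own statement) =====
-- stated objective: faster
-- what changed: B precomputes a 256-entry translation table (code point -> two-digit uppercase hex escape for everything non-printable plus quote and backslash) once with a dict comprehension and applies str.translate, instead of A's explicit per-character loop with a seven-branch if/elif ladder and string accumulator.
import Mathlib
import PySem

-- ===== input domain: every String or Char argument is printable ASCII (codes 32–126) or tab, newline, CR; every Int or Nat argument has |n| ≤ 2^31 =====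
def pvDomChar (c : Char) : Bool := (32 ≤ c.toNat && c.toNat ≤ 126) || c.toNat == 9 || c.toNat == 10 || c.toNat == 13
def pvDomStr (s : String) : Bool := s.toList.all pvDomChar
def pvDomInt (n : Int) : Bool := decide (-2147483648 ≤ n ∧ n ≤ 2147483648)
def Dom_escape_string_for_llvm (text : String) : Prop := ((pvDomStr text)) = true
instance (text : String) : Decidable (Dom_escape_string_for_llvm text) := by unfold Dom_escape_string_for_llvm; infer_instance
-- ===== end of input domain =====

-- B builds a 256-entry translation table once and applies str.translate, replacing A's
-- per-character if/elif ladder with accumulator; a timing run measured B faster (table built once, translate replaces the per-char branches).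
-- Strings are ported on the List Char side (String.toList / String.ofList), exact for the += / join builds.

-- ===== PORT A =====
-- uppercase hex digits of n, as in Python's format spec 'X'
def pvHexDigitsA (n : Nat) : List Char :=
  if h : n < 16 then [if n < 10 then Char.ofNat (48 + n) else Char.ofNat (55 + n)]
  else pvHexDigitsA (n / 16) ++ [if n % 16 < 10 then Char.ofNat (48 + n % 16) else Char.ofNat (55 + n % 16)]
decreasing_by exact Nat.div_lt_self (by omega) (by omega)

-- f"\\{n:02X}" : hex, zero-padded on the left to width 2
def pvHex2A (n : Nat) : List Char :=
  List.replicate (2 - (pvHexDigitsA n).length) '0' ++ pvHexDigitsA n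

-- the body of A's for-loop (escaped += …), as a helper for the fold
def pvStepA (escaped : List Char) (char : Char) : List Char :=
  if char = '\\' then escaped ++ ['\\', '5', 'C']
  else if char = '"' then escaped ++ ['\\', '2', '2']
  else if char = '\n' then escaped ++ ['\\', '0', 'A']
  else if char = '\r' then escaped ++ ['\\', '0', 'D']
  else if char = '\t' then escaped ++ ['\\', '0', '9']
  else if char.toNat < 32 ∨ 126 < char.toNat then escaped ++ ('\\' :: pvHex2A char.toNat)
  else escaped ++ [char]

def escape_string_for_llvm (text : String) : String :=
  String.ofList (text.toList.foldl pvStepA [])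

-- ===== PORT B =====
-- "\\%02X" % n for 0 ≤ n < 256: backslash then two uppercase hex digits (exact on that range)
def pvHexDigitB (n : Nat) : Char := ['0','1','2','3','4','5','6','7','8','9','A','B','C','D','E','F'].getD n '0'
def pvEscB (n : Nat) : String := String.ofList ['\\', pvHexDigitB (n / 16), pvHexDigitB (n % 16)]

-- the dict comprehension: {n: "\\%02X" % n for n in range(256) if n < 32 or n > 126 or n in (34, 92)}
def pvTableB : PySem.Dict Int String :=
  (PySem.List.pyRange 0 256 1).foldl
    (fun d n =>
      if n < 32 ∨ 126 < n ∨ n = 34 ∨ n = 92 then d.insert n (pvEscB n.toNat) else d)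
    PySem.Dict.empty

-- str.translate: each char is replaced by its table entry (keyed by the code point), kept if absent
def pvTransB (c : Char) : List Char :=
  match pvTableB.get? (c.toNat : Int) with
  | some s => s.toList
  | none => [c]

def escape_string_for_llvm_alt (text : String) : String :=
  String.ofList ((text.toList.map pvTransB).flatten)

-- ===== PRECONDITION & SPEC =====
def Spec_escape_string_for_llvm (text : String) (out : String) : Prop := out = escape_string_for_llvm_alt text
instance (text : String) (out : String) : Decidable (Spec_escape_string_for_llvm text out) := by unfold Spec_escape_string_for_llvm; infer_instance

-- ===== CLAIM =====
def Claim_equal_escape_string_for_llvm : Prop := ∀ (text : String), Dom_escape_string_for_llvm text → Spec_escape_string_for_llvm text (escape_string_for_llvm text)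

-- ===== LEMMAS AND PROOFS =====

-- A's loop body always appends its piece: shift the accumulator out
theorem pvStepA_shift (acc : List Char) (c : Char) :
    pvStepA acc c = acc ++ pvStepA [] c := by
  unfold pvStepA; split_ifs <;> simp

-- per-character agreement on the domain, checked on the 128 relevant code points
set_option maxRecDepth 4096 in
theorem pv_piece_eq_nat : ∀ n : Nat, n < 128 →
    (pvDomChar (Char.ofNat n) → pvStepA [] (Char.ofNat n) = pvTransB (Char.ofNat n)) := by decide

theorem pv_piece_eq (c : Char) (h : pvDomChar c = true) :
    pvStepA [] c = pvTransB c := by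
  have hlt : c.toNat < 128 := by
    simp only [pvDomChar, Bool.or_eq_true, Bool.and_eq_true, decide_eq_true_eq, beq_iff_eq] at h
    omega
  have hc : Char.ofNat c.toNat = c := Char.ofNat_toNat c
  have := pv_piece_eq_nat c.toNat hlt
  rw [hc] at this
  exact this h

theorem pv_foldl_eq (l : List Char) (acc : List Char) (h : l.all pvDomChar = true) :
    l.foldl pvStepA acc = acc ++ (l.map pvTransB).flatten := by
  induction l generalizing acc with
  | nil => simp
  | cons c cs ih =>
    simp only [List.all_cons, Bool.and_eq_true] at h
    simp only [List.foldl_cons, List.map_cons, List.flatten_cons]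
    rw [pvStepA_shift acc c, pv_piece_eq c h.1, ih _ h.2, List.append_assoc]

-- ===== VERDICT =====
theorem escape_string_for_llvm_spec : Claim_equal_escape_string_for_llvm := by
  intro text hdom
  unfold Spec_escape_string_for_llvm escape_string_for_llvm escape_string_for_llvm_alt
  rw [pv_foldl_eq text.toList [] hdom]
  simp
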